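-- pv_equiv track=rewrite | github.com/Elegant-Smile/PythonDailyQuestion | Answer/Yuzhou_1shu/20190527_1odd_number.py | odd_number_combination
-- ===== SOURCE A (Python) =====
-- def odd_number_combination(n):
--     '''
--     1.数字首位不能为0，可放数字为n个
--     2.末位数字必须为奇数，可放数字为odd[1,n]个
--     3.中间位数字任意，可放数字为n+1个
--     :param n:0-9之间的数字
--     :return:组成的奇数总数
--     '''
--
--     first = n
--     last = len([x for x in range(n + 1) if x % 2 != 0])
--     sum = last + first * last
--     if n < 2:
--         return sum
--     for i in range(2, n + 1):
--         middle = (n + 1) ** (i - 1)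
--         sum += first * middle * last
--
--     return sum
-- ===== SOURCE B (Python) =====
-- def odd_number_combination(n):
--     if n < 0:
--         return 0
--     last = (n + 1) // 2
--     if n < 2:
--         return last + n * last
--     # closed form: the loop sums first*last*(n+1)**(i-1) for i in 2..n,
--     # i.e. a geometric series; (n+1)**n - 1 is exactly divisible by n.
--     return last + n * last * (((n + 1) ** n - 1) // n)
-- ===== Notes on version B (the rewrite author's own statement) =====
-- stated objective: faster
-- what changed: Replaces the O(n) loop of growing powers (and the list-comprehension count of odds) with the geometric-series closed form last + n*last*(((n+1)**n - 1)//n) and a direct (n+1)//2 count.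
import Mathlib
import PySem

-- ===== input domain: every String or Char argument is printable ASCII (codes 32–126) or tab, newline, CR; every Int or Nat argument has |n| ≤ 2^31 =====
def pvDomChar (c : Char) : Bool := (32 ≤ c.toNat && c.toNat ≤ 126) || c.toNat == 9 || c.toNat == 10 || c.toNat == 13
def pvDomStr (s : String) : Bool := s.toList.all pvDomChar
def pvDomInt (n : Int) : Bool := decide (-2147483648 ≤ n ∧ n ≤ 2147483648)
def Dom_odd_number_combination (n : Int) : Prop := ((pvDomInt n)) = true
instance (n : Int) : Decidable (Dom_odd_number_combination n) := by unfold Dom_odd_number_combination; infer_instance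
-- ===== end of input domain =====

-- B replaces A's O(n) loop of growing powers by the geometric-series closed form
-- last + n*last*(((n+1)^n - 1) // n) (objective: faster).

-- ===== PORT A =====
def odd_number_combination (n : Int) : Int :=
  let first := n
  let last : Int :=
    ((PySem.List.pyRange 0 (n + 1) 1).filter (fun x => PySem.Int.mod x 2 != 0)).length
  let sum := last + first * last
  if n < 2 then sum
  else
    (PySem.List.pyRange 2 (n + 1) 1).foldl
      (fun s i =>
        let middle := (n + 1) ^ (i - 1).toNat   -- (n+1)**(i-1), exponent i-1 ≥ 1 on this range
        s + first * middle * last) sum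

-- ===== PORT B =====
def odd_number_combination_alt (n : Int) : Int :=
  if n < 0 then 0
  else
    let last := PySem.Int.floordiv (n + 1) 2
    if n < 2 then last + n * last
    else last + n * last * PySem.Int.floordiv ((n + 1) ^ n.toNat - 1) n

-- ===== PRECONDITION & SPEC =====
def Spec_odd_number_combination (n : Int) (out : Int) : Prop := out = odd_number_combination_alt n
instance (n : Int) (out : Int) : Decidable (Spec_odd_number_combination n out) := by unfold Spec_odd_number_combination; infer_instance

-- ===== CLAIM (what is proved, stated in full; the proofs are below) =====
def Claim_equal_odd_number_combination : Prop := ∀ (n : Int), Dom_odd_number_combination n → Spec_odd_number_combination n (odd_number_combination n)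

-- ===== LEMMAS AND PROOFS =====

-- A's count of odds in range(n+1), on a Nat bound: m/2 odds below m.
lemma count_odds_nat (m : Nat) :
    (((PySem.List.pyRange 0 (m : Int) 1).filter (fun x => PySem.Int.mod x 2 != 0)).length : Int)
      = ((m / 2 : Nat) : Int) := by
  induction m with
  | zero => simp
  | succ m ih =>
    rw [show ((m + 1 : Nat) : Int) = (m : Int) + 1 by push_cast; ring,
        PySem.List.pyRange_one_succ_right (by omega)]
    rw [List.filter_append, List.length_append]
    push_cast
    rw [ih]
    simp only [List.filter_cons, List.filter_nil]
    have hcast : PySem.Int.mod (m : Int) 2 = ((m % 2 : Nat) : Int) := by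
      exact_mod_cast PySem.Int.mod_natCast m 2
    rcases Nat.even_or_odd m with h | h
    · have h2 : m % 2 = 0 := Nat.even_iff.mp h
      have hm : PySem.Int.mod (m : Int) 2 = 0 := by rw [hcast, h2]; rfl
      simp only [hm]
      norm_num
      omega
    · have h2 : m % 2 = 1 := Nat.odd_iff.mp h
      have hm : PySem.Int.mod (m : Int) 2 = 1 := by rw [hcast, h2]; rfl
      simp only [hm]
      norm_num
      omega

-- A's `last` equals B's: 0 for negative n, (n+1)//2 otherwise.
lemma lastA_eq (n : Int) :
    (((PySem.List.pyRange 0 (n + 1) 1).filter (fun x => PySem.Int.mod x 2 != 0)).length : Int)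
      = if n < 0 then 0 else PySem.Int.floordiv (n + 1) 2 := by
  by_cases h : n < 0
  · rw [PySem.List.pyRange_one_eq_nil (by omega)]
    simp [h]
  · have h0 : (0:Int) ≤ n := by omega
    have hc : ((n + 1).toNat : Int) = n + 1 := by omega
    rw [if_neg h, ← hc, count_odds_nat]
    exact_mod_cast (PySem.Int.floordiv_natCast (n + 1).toNat 2).symm

-- A's loop is first*last times a geometric partial sum.
lemma loopA_eq (n last s0 : Int) (m : Nat) :
    (PySem.List.pyRange 2 (2 + (m : Int)) 1).foldl
      (fun s i => s + n * (n + 1) ^ (i - 1).toNat * last) s0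
      = s0 + n * last * ∑ j ∈ Finset.range m, (n + 1) ^ (j + 1) := by
  induction m with
  | zero => simp [PySem.List.pyRange_one_eq_nil]
  | succ m ih =>
    rw [show (2 + ((m + 1 : Nat) : Int)) = (2 + (m : Int)) + 1 by push_cast; ring,
        PySem.List.pyRange_one_succ_right (by omega), List.foldl_append, ih]
    simp only [List.foldl_cons, List.foldl_nil, Finset.sum_range_succ]
    have he : ((2 + (m : Int)) - 1).toNat = m + 1 := by omega
    rw [he]
    ring

-- exact geometric division: ((n+1)^k - 1) // n = Σ_{j<k} (n+1)^j  (n > 0)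
lemma geom_div (n : Int) (hn : 0 < n) (k : Nat) :
    PySem.Int.floordiv ((n + 1) ^ k - 1) n = ∑ j ∈ Finset.range k, (n + 1) ^ j := by
  have hg : (∑ j ∈ Finset.range k, (n + 1) ^ j) * ((n + 1) - 1) = (n + 1) ^ k - 1 :=
    geom_sum_mul (n + 1) k
  have : (n + 1) ^ k - 1 = (∑ j ∈ Finset.range k, (n + 1) ^ j) * n := by
    rw [← hg]; ring
  rw [this, PySem.Int.floordiv_eq_ediv_of_pos hn, Int.mul_ediv_cancel _ (by omega)]

-- ===== VERDICT (by name: the statement is the Claim_ definition above) =====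
theorem odd_number_combination_spec : Claim_equal_odd_number_combination := by
  intro n _
  show odd_number_combination n = odd_number_combination_alt n
  unfold odd_number_combination odd_number_combination_alt
  by_cases hneg : n < 0
  · have hlast := lastA_eq n
    rw [if_pos hneg] at hlast
    simp only [hlast, if_pos (show n < 2 by omega), if_pos hneg]
    ring
  · have hlast := lastA_eq n
    rw [if_neg hneg] at hlast
    rw [if_neg hneg]
    by_cases h2 : n < 2
    · simp only [hlast, if_pos h2]
    · simp only [hlast, if_neg h2]
      have hm : n + 1 = 2 + ((n - 1).toNat : Int) := by omega
      rw [geom_div n (by omega) n.toNat,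
          show PySem.List.pyRange 2 (n + 1) 1
              = PySem.List.pyRange 2 (2 + ((n - 1).toNat : Int)) 1 from by rw [← hm],
          loopA_eq n _ _ (n - 1).toNat]
      have hk : n.toNat = (n - 1).toNat + 1 := by omega
      rw [hk, Finset.sum_range_succ']
      simp only [pow_zero]
      ring
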